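-- pv_equiv track=rewrite | github.com/KyungMinJin/coding-test | kakao/secret_map.py | solution
-- ===== SOURCE A (Python) =====
-- def decode(arr, n):
--     res = ["" for _ in arr]
--     for idx, a in enumerate(arr):
--         for _ in range(n):
--             if a % 2 == 1:
--                 res[idx] = "1" + res[idx]
--                 a -= 1
--                 a //= 2
--             else:
--                 res[idx] = "0" + res[idx]
--                 a //= 2
--
--     return res
--
-- def solution(n, arr1, arr2):
--     answer = ["" for _ in range(n)]
--     d_1 = decode(arr1, n)
--     d_2 = decode(arr2, n)
--
--     for i in range(n):
--         for j in range(n):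
--             if d_1[i][j] == '1' or d_2[i][j] == '1':
--                 answer[i] += "#"
--             else:
--                 answer[i] += " "
--
--
--     return answer
-- ===== SOURCE B (Python) =====
-- def solution(n, arr1, arr2):
--     return [''.join('#' if (arr1[i] | arr2[i]) >> k & 1 else ' '
--                     for k in range(n - 1, -1, -1))
--             for i in range(n)]
-- ===== Notes on version B (the rewrite author's own statement) =====
-- stated objective: simpler
-- what changed: B drops A's two decoded n-bit string grids and the character-by-character OR loop, instead ORing the two integers of each row once and rendering the bits MSB-first in a single comprehension.
-- outside the precondition, e.g. on solution(1, [1], []): A returns ['#'], B raises IndexError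
import Mathlib
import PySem

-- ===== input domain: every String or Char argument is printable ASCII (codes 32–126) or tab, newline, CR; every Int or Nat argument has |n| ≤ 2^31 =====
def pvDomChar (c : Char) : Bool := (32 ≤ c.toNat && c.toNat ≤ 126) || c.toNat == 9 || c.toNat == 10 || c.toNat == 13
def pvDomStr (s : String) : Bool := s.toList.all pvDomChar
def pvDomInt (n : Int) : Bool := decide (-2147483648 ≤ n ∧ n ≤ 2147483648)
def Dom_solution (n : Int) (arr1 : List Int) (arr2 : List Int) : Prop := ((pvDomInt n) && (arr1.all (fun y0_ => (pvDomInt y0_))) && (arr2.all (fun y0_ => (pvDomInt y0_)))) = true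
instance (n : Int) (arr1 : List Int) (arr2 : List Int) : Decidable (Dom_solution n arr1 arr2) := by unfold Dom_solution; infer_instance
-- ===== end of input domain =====

-- B replaces A's two decoded string grids and character-by-character OR with one pass
-- that ORs the integers per row and renders the bits directly (objective: simpler).

-- ===== PORT A =====
-- inner body of decode's per-element bit loop (state: accumulated chars, remaining value)
def pvDecodeStep (st : List Char × Int) : List Char × Int :=
  if PySem.Int.mod st.2 2 = 1 then ('1' :: st.1, PySem.Int.floordiv (st.2 - 1) 2)
  else ('0' :: st.1, PySem.Int.floordiv st.2 2)

-- decode(arr, n): rows modelled as List Char (Python builds strings by prepending)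
def pvDecode (arr : List Int) (n : Int) : List (List Char) :=
  arr.map (fun a => ((PySem.List.pyRange 0 n 1).foldl (fun st _ => pvDecodeStep st) ([], a)).1)

def solution (n : Int) (arr1 : List Int) (arr2 : List Int) : List String :=
  (((PySem.List.pyRange 0 n 1).foldl (fun ans i =>
    (PySem.List.pyRange 0 n 1).foldl (fun ans2 j =>
      ans2.set i.toNat (PySem.List.pyGetD ans2 i [] ++
        [if PySem.List.pyGetD (PySem.List.pyGetD (pvDecode arr1 n) i []) j ' ' = '1' ∨
            PySem.List.pyGetD (PySem.List.pyGetD (pvDecode arr2 n) i []) j ' ' = '1'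
         then '#' else ' '])) ans)
    ((PySem.List.pyRange 0 n 1).map (fun _ => ([] : List Char)))).map (fun r => String.mk r))

-- ===== PORT B =====
def solution_alt (n : Int) (arr1 : List Int) (arr2 : List Int) : List String :=
  (PySem.List.pyRange 0 n 1).map (fun i =>
    String.mk ((PySem.List.pyRange (n - 1) (-1) (-1)).map (fun k =>
      if PySem.Int.band
           ((PySem.Int.bor (PySem.List.pyGetD arr1 i 0) (PySem.List.pyGetD arr2 i 0)) >>> k.toNat)
           1 ≠ 0
      then '#' else ' ')))

-- ===== PRECONDITION & SPEC =====
-- Pre_ excludes inputs where a list is shorter than n: there A raises IndexError, except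
-- that when arr1's bits are all ones A can still return via or-short-circuiting — an
-- accident of evaluation order on which B (which always reads arr2[i]) raises.
def Pre_solution (n : Int) (arr1 : List Int) (arr2 : List Int) : Prop :=
  n ≤ (arr1.length : Int) ∧ n ≤ (arr2.length : Int)
instance (n : Int) (arr1 : List Int) (arr2 : List Int) : Decidable (Pre_solution n arr1 arr2) := by
  unfold Pre_solution; infer_instance
def pvWitness_solution : Int × List Int × List Int := (2, [2, 1], [1, 2])

def Spec_solution (n : Int) (arr1 : List Int) (arr2 : List Int) (out : List String) : Prop :=
  out = solution_alt n arr1 arr2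
instance (n : Int) (arr1 : List Int) (arr2 : List Int) (out : List String) :
    Decidable (Spec_solution n arr1 arr2 out) := by unfold Spec_solution; infer_instance

-- ===== CLAIM (what is proved, stated in full; the proofs are below) =====
def Claim_equal_solution : Prop := ∀ (n : Int) (arr1 : List Int) (arr2 : List Int),
  Dom_solution n arr1 arr2 → Pre_solution n arr1 arr2 →
  Spec_solution n arr1 arr2 (solution n arr1 arr2)

-- ===== LEMMAS AND PROOFS =====

theorem pv_add_eq_or (a : Nat) : ∀ b : Nat, a &&& b = 0 → a + b = a ||| b := by
  induction a using Nat.binaryRec with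
  | zero => simp
  | bit ab a2 ih =>
    intro b h
    rw [← Nat.bit_bodd_div2 b] at h ⊢
    rw [Nat.land_bit] at h
    rw [Nat.lor_bit]
    rw [Nat.bit_eq_zero_iff] at h
    have h3 := h.2
    cases hab : ab <;> cases hbb : b.bodd <;>
      simp_all [Nat.bit_val] <;> (rw [← ih _ h]; omega)

theorem nat_sub_and_eq_ldiff (m n : Nat) : m - (m &&& n) = Nat.ldiff m n := by
  have hd : (Nat.ldiff m n) &&& (m &&& n) = 0 := by
    apply Nat.eq_of_testBit_eq; intro k
    simp [Nat.testBit_ldiff]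
    cases m.testBit k <;> cases n.testBit k <;> decide
  have hor : (Nat.ldiff m n) ||| (m &&& n) = m := by
    apply Nat.eq_of_testBit_eq; intro k
    simp [Nat.testBit_ldiff]
    cases m.testBit k <;> cases n.testBit k <;> decide
  have hadd := pv_add_eq_or _ _ hd
  have := Nat.and_le_left (n := m) (m := n)
  omega

theorem pv_bor_eq_lor (a b : Int) : PySem.Int.bor a b = Int.lor a b := by
  cases a with
  | ofNat m => cases b with
    | ofNat n => simp [PySem.Int.bor, Int.lor]
    | negSucc n =>
        simp only [PySem.Int.bor, Int.lor]
        split_ifs with h h' h''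
        · rw [Int.negSucc_eq] at h'; omega
        · have h1 : (-Int.negSucc n - 1).toNat = n := by simp [Int.negSucc_eq]
          have h2 : (Int.ofNat m).toNat = m := rfl
          rw [h1, h2, nat_sub_and_eq_ldiff n m, Int.negSucc_eq]; omega
        · rw [Int.ofNat_eq_natCast] at h; omega
        · rw [Int.ofNat_eq_natCast] at h; omega
  | negSucc m => cases b with
    | ofNat n =>
        simp only [PySem.Int.bor, Int.lor]
        split_ifs with h h' h''
        · rw [Int.negSucc_eq] at h; omega
        · rw [Int.negSucc_eq] at h; omega
        · have h1 : (-Int.negSucc m - 1).toNat = m := by simp [Int.negSucc_eq]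
          have h2 : (Int.ofNat n).toNat = n := rfl
          rw [h1, h2, nat_sub_and_eq_ldiff m n, Int.negSucc_eq]; omega
        · rw [Int.ofNat_eq_natCast] at h''; omega
    | negSucc n =>
        simp only [PySem.Int.bor, Int.lor]
        split_ifs with h h' h''
        · rw [Int.negSucc_eq] at h; omega
        · rw [Int.negSucc_eq] at h; omega
        · rw [Int.negSucc_eq] at h''; omega
        · have h1 : (-Int.negSucc m - 1).toNat = m := by simp [Int.negSucc_eq]
          have h2 : (-Int.negSucc n - 1).toNat = n := by simp [Int.negSucc_eq]
          rw [h1, h2, Int.negSucc_eq]; omega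

theorem pv_testBit_iff (x : Int) (k : Nat) :
    x.testBit k = true ↔ PySem.Int.mod (x >>> k) 2 = 1 := by
  rw [PySem.Int.mod_eq_emod_of_pos (by norm_num)]
  cases x with
  | ofNat m =>
      show (Nat.testBit m k) = true ↔ (Int.ofNat (m >>> k)) % 2 = 1
      rw [Nat.testBit_eq_decide_div_mod_eq, Nat.shiftRight_eq_div_pow]
      rw [Int.ofNat_eq_natCast]
      simp only [decide_eq_true_eq]
      omega
  | negSucc m =>
      show (!Nat.testBit m k) = true ↔ (Int.negSucc (m >>> k)) % 2 = 1
      rw [Nat.testBit_eq_decide_div_mod_eq, Nat.shiftRight_eq_div_pow, Int.negSucc_eq]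
      simp only [Bool.not_eq_eq_eq_not, Bool.not_true, decide_eq_false_iff_not]
      omega

theorem pv_floordiv_two_shift (a : Int) : PySem.Int.floordiv a 2 = a >>> (1 : Nat) := by
  rw [Int.shiftRight_eq_div_pow]
  simp [PySem.Int.floordiv, Int.fdiv_eq_ediv]

theorem pv_floordiv_odd (a : Int) (h : PySem.Int.mod a 2 = 1) :
    PySem.Int.floordiv (a - 1) 2 = PySem.Int.floordiv a 2 := by
  rw [PySem.Int.mod_eq_emod_of_pos (by norm_num)] at h
  rw [PySem.Int.floordiv_eq_ediv_of_pos (by norm_num),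
      PySem.Int.floordiv_eq_ediv_of_pos (by norm_num)]
  omega

def pvBitChar (a : Int) (k : Nat) : Char := if a.testBit k then '1' else '0'

theorem pv_testBit_shift (a : Int) (k : Nat) :
    (a >>> (1 : Nat)).testBit k = a.testBit (k + 1) := by
  have h1 := pv_testBit_iff (a >>> (1 : Nat)) k
  have h2 := pv_testBit_iff a (k + 1)
  rw [show (a >>> (1:Nat)) >>> k = a >>> (1 + k) from (Int.shiftRight_add a 1 k).symm,
      Nat.add_comm 1 k] at h1
  rw [Bool.eq_iff_iff, h1, h2]

theorem pv_step_eq (s : List Char) (a : Int) :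
    pvDecodeStep (s, a) = (pvBitChar a 0 :: s, a >>> (1 : Nat)) := by
  have h0 : a.testBit 0 = true ↔ PySem.Int.mod a 2 = 1 := by
    have := pv_testBit_iff a 0
    rwa [Int.shiftRight_zero] at this
  unfold pvDecodeStep pvBitChar
  by_cases h : PySem.Int.mod a 2 = 1
  · rw [if_pos h, if_pos (h0.mpr h), pv_floordiv_odd a h, pv_floordiv_two_shift]
  · rw [if_neg h, if_neg (by intro hc; exact h (h0.mp hc)), pv_floordiv_two_shift]

theorem pv_range_rev_succ {α : Type} (f : Nat → α) (m : Nat) :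
    (List.range (m + 1)).reverse.map f
      = (List.range m).reverse.map (fun k => f (k + 1)) ++ [f 0] := by
  rw [List.range_succ_eq_map]
  simp [List.map_reverse, List.map_map, Function.comp]

theorem pv_dec_fold (l : List Int) : ∀ (s : List Char) (a : Int),
    l.foldl (fun st _ => pvDecodeStep st) (s, a)
      = ((List.range l.length).reverse.map (pvBitChar a) ++ s, a >>> l.length) := by
  induction l with
  | nil => intro s a; simp
  | cons x l ih =>
      intro s a
      rw [List.foldl_cons, pv_step_eq]
      rw [ih (pvBitChar a 0 :: s) (a >>> (1 : Nat))]
      have hb : (List.range l.length).reverse.map (pvBitChar (a >>> (1:Nat)))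
          = (List.range l.length).reverse.map (fun k => pvBitChar a (k + 1)) := by
        apply List.map_congr_left; intro k _
        unfold pvBitChar; rw [pv_testBit_shift]
      rw [hb]
      have hlen : (x :: l).length = l.length + 1 := rfl
      rw [hlen, pv_range_rev_succ (pvBitChar a) l.length]
      have hs : (a >>> (1:Nat)) >>> l.length = a >>> (l.length + 1) := by
        rw [← Int.shiftRight_add a 1 l.length, Nat.add_comm 1 l.length]
      rw [hs]
      simp [List.append_assoc]

theorem pv_pyGetD_nn {α : Type} (xs : List α) (i : Int) (d : α) (hi : 0 ≤ i)
    (h : i.toNat < xs.length) : PySem.List.pyGetD xs i d = xs[i.toNat] := by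
  obtain ⟨k, rfl⟩ : ∃ k : Nat, i = (k : Int) := ⟨i.toNat, (Int.toNat_of_nonneg hi).symm⟩
  simp only [PySem.List.pyGetD_natCast, Int.toNat_natCast] at *
  exact List.getD_eq_getElem _ _ (by simpa using h)

theorem pv_inner (c : Int → Char) (i : Int) (hi : 0 ≤ i) : ∀ (js : List Int)
    (ans : List (List Char)), i.toNat < ans.length →
    js.foldl (fun ans2 j => ans2.set i.toNat (PySem.List.pyGetD ans2 i [] ++ [c j])) ans
      = ans.set i.toNat (PySem.List.pyGetD ans i [] ++ js.map c) := by
  intro js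
  induction js with
  | nil =>
      intro ans h
      simp only [List.foldl_nil, List.map_nil, List.append_nil]
      rw [pv_pyGetD_nn ans i [] hi h, List.set_getElem_self]
  | cons j js ih =>
      intro ans h
      rw [List.foldl_cons]
      rw [ih _ (by simpa using h)]
      have hg : PySem.List.pyGetD (ans.set i.toNat (PySem.List.pyGetD ans i [] ++ [c j])) i []
          = PySem.List.pyGetD ans i [] ++ [c j] := by
        rw [pv_pyGetD_nn _ i [] hi (by simpa using h), pv_pyGetD_nn ans i [] hi h]
        simp [List.getElem_set_self]
      rw [hg, List.set_set, List.append_assoc]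
      rfl

theorem pv_getD_set_bridge (L : List (List Char)) (k : Nat) (x : List Char)
    (h : k < L.length) : (L.set k x).getD k [] = x := by
  rw [List.getD_eq_getElem _ _ (by simpa using h)]
  simp [List.getElem_set_self]

theorem pv_getD_set_ne {α : Type} (L : List (List α)) (k j : Nat) (x : List α)
    (h : k ≠ j) : (L.set k x).getD j [] = L.getD j [] := by
  simp [List.getD_eq_getElem?_getD, List.getElem?_set_ne h]

theorem pv_outer (c : Int → Int → Char) (nn : Int) (jl : List Int) :
    ∀ (fuel : Nat) (m : Int) (ans : List (List Char)), 0 ≤ m → (nn - m).toNat = fuel →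
    ans.length = nn.toNat →
    (∀ j : Nat, m ≤ (j : Int) → ans.getD j [] = []) →
    (((PySem.List.pyRange m nn 1).foldl (fun ans i =>
        jl.foldl (fun ans2 j => ans2.set i.toNat (PySem.List.pyGetD ans2 i [] ++ [c i j])) ans)
        ans).length = nn.toNat ∧
      ∀ j : Nat, ((PySem.List.pyRange m nn 1).foldl (fun ans i =>
        jl.foldl (fun ans2 j => ans2.set i.toNat (PySem.List.pyGetD ans2 i [] ++ [c i j])) ans)
        ans).getD j []
        = if (j : Int) < m ∨ nn ≤ (j : Int) then ans.getD j [] else jl.map (c j)) := by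
  intro fuel
  induction fuel with
  | zero =>
      intro m ans hm hf hlen hz
      rw [PySem.List.pyRange_one_eq_nil (by omega)]
      simp only [List.foldl_nil]
      refine ⟨hlen, fun j => ?_⟩
      rw [if_pos (by omega)]
  | succ fuel ih =>
      intro m ans hm hf hlen hz
      rw [PySem.List.pyRange_one_cons (by omega)]
      rw [List.foldl_cons]
      have hmlt : m.toNat < ans.length := by omega
      rw [pv_inner (c m) m hm jl ans hmlt]
      set ans' := ans.set m.toNat (PySem.List.pyGetD ans m [] ++ jl.map (c m)) with hans'
      have hg0 : PySem.List.pyGetD ans m [] = [] := by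
        rw [pv_pyGetD_nn ans m [] hm hmlt]
        have := hz m.toNat (by omega)
        rwa [List.getD_eq_getElem _ _ hmlt] at this
      have hlen' : ans'.length = nn.toNat := by rw [hans']; simpa using hlen
      have hz' : ∀ j : Nat, (m + 1) ≤ (j : Int) → ans'.getD j [] = [] := by
        intro j hj
        rw [hans', pv_getD_set_ne _ _ _ _ (by omega)]
        exact hz j (by omega)
      obtain ⟨hL, hG⟩ := ih (m + 1) ans' (by omega) (by omega) hlen' hz'
      refine ⟨hL, fun j => ?_⟩
      rw [hG j]
      by_cases hj1 : (j : Int) < m + 1 ∨ nn ≤ (j : Int)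
      · rw [if_pos hj1]
        by_cases hj2 : (j : Int) < m ∨ nn ≤ (j : Int)
        · rw [if_pos hj2, hans', pv_getD_set_ne _ _ _ _ (by omega)]
        · rw [if_neg hj2]
          have hjm : j = m.toNat := by omega
          rw [hans', hjm, hg0, List.nil_append]
          rw [pv_getD_set_bridge _ _ _ (by omega)]
          rw [show ((m.toNat : Nat) : Int) = m from Int.toNat_of_nonneg hm]
      · rw [if_neg hj1, if_neg (by omega)]

theorem pv_bit_or (a b : Int) (k : Nat) :
    (PySem.Int.band ((PySem.Int.bor a b) >>> k) 1 ≠ 0)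
      ↔ (pvBitChar a k = '1' ∨ pvBitChar b k = '1') := by
  rw [PySem.Int.band_one]
  have hmod : PySem.Int.mod ((PySem.Int.bor a b) >>> k) 2
      = ((PySem.Int.bor a b) >>> k) % 2 := PySem.Int.mod_eq_emod_of_pos (by norm_num)
  have hne : PySem.Int.mod ((PySem.Int.bor a b) >>> k) 2 ≠ 0
      ↔ PySem.Int.mod ((PySem.Int.bor a b) >>> k) 2 = 1 := by
    rw [hmod]; omega
  rw [hne, ← pv_testBit_iff, pv_bor_eq_lor, Int.testBit_lor]
  unfold pvBitChar
  cases ha : a.testBit k <;> cases hb : b.testBit k <;> simp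

-- the decoded row of value a at string position j (0 ≤ j < nn) is bit (nn-1-j)
theorem pv_dec_row (arr : List Int) (n : Int) (i : Nat) (hi : i < arr.length) :
    PySem.List.pyGetD (pvDecode arr n) (i : Int) []
      = (List.range (n.toNat)).reverse.map (pvBitChar arr[i]) := by
  unfold pvDecode
  rw [pv_pyGetD_nn _ _ [] (by omega) (by simpa using hi)]
  simp only [Int.toNat_natCast, List.getElem_map]
  rw [pv_dec_fold _ [] arr[i]]
  simp [PySem.List.length_pyRange_one]

-- row equality: A's row i via decoded grids equals B's direct bit rendering
theorem pv_row_eq (n : Int) (arr1 arr2 : List Int) (h1 : n ≤ (arr1.length : Int))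
    (h2 : n ≤ (arr2.length : Int)) (t : Nat) (ht : t < n.toNat) :
    (PySem.List.pyRange 0 n 1).map (fun j =>
      if PySem.List.pyGetD (PySem.List.pyGetD (pvDecode arr1 n) (t : Int) []) j ' ' = '1' ∨
         PySem.List.pyGetD (PySem.List.pyGetD (pvDecode arr2 n) (t : Int) []) j ' ' = '1'
      then '#' else ' ')
    = (PySem.List.pyRange (n - 1) (-1) (-1)).map (fun k =>
        if PySem.Int.band
            ((PySem.Int.bor (PySem.List.pyGetD arr1 (t : Int) 0)
              (PySem.List.pyGetD arr2 (t : Int) 0)) >>> k.toNat) 1 ≠ 0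
        then '#' else ' ') := by
  have ht1 : t < arr1.length := by omega
  have ht2 : t < arr2.length := by omega
  rw [pv_dec_row arr1 n t ht1, pv_dec_row arr2 n t ht2]
  rw [pv_pyGetD_nn arr1 (t : Int) 0 (by omega) (by simpa using ht1)]
  rw [pv_pyGetD_nn arr2 (t : Int) 0 (by omega) (by simpa using ht2)]
  simp only [Int.toNat_natCast]
  rw [PySem.List.pyRange_one, PySem.List.pyRange_neg_one]
  rw [List.map_map, List.map_map]
  have hnn1 : (n - 0).toNat = n.toNat := by omega
  have hnn2 : (n - 1 - (-1)).toNat = n.toNat := by omega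
  rw [hnn1, hnn2]
  apply List.map_congr_left
  intro u hu
  have hu' : u < n.toNat := List.mem_range.mp hu
  simp only [Function.comp]
  have hAl : ((List.range n.toNat).reverse.map (pvBitChar arr1[t])).length = n.toNat := by simp
  have hBl : ((List.range n.toNat).reverse.map (pvBitChar arr2[t])).length = n.toNat := by simp
  have hgA : PySem.List.pyGetD ((List.range n.toNat).reverse.map (pvBitChar arr1[t]))
      ((0 : Int) + (u : Int)) ' ' = pvBitChar arr1[t] (n.toNat - 1 - u) := by
    rw [show (0 : Int) + (u : Int) = (u : Int) by ring]
    rw [pv_pyGetD_nn _ _ _ (by omega) (by simp [Int.toNat_natCast]; omega)]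
    simp [List.getElem_reverse, List.getElem_range]
  have hgB : PySem.List.pyGetD ((List.range n.toNat).reverse.map (pvBitChar arr2[t]))
      ((0 : Int) + (u : Int)) ' ' = pvBitChar arr2[t] (n.toNat - 1 - u) := by
    rw [show (0 : Int) + (u : Int) = (u : Int) by ring]
    rw [pv_pyGetD_nn _ _ _ (by omega) (by simp [Int.toNat_natCast]; omega)]
    simp [List.getElem_reverse, List.getElem_range]
  rw [hgA, hgB]
  have hk : (n - 1 - (u : Int)).toNat = n.toNat - 1 - u := by omega
  rw [hk]
  simp only [Int.shiftRight_natCast_right]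
  have hb := pv_bit_or arr1[t] arr2[t] (n.toNat - 1 - u)
  by_cases hc : pvBitChar arr1[t] (n.toNat - 1 - u) = '1' ∨ pvBitChar arr2[t] (n.toNat - 1 - u) = '1'
  · rw [if_pos hc, if_pos (hb.mpr hc)]
  · rw [if_neg hc, if_neg (fun hx => hc (hb.mp hx))]

-- ===== VERDICT (by name: the statement is the Claim_ definition above) =====
theorem solution_spec : Claim_equal_solution := by
  intro n arr1 arr2 hdom hpre
  unfold Spec_solution
  obtain ⟨h1, h2⟩ := hpre
  unfold solution solution_alt
  have hansl : ((PySem.List.pyRange 0 n 1).map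
      (fun _ => ([] : List Char))).length = n.toNat := by
    simp [PySem.List.length_pyRange_one]
  have hansz : ∀ j : Nat, ((PySem.List.pyRange 0 n 1).map
      (fun _ => ([] : List Char))).getD j [] = [] := by
    intro j
    simp only [List.getD_eq_getElem?_getD, List.getElem?_map]
    cases (PySem.List.pyRange 0 n 1)[j]? <;> simp
  obtain ⟨hL, hG⟩ := pv_outer
    (fun i j => if PySem.List.pyGetD (PySem.List.pyGetD (pvDecode arr1 n) i []) j ' ' = '1' ∨
        PySem.List.pyGetD (PySem.List.pyGetD (pvDecode arr2 n) i []) j ' ' = '1'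
      then '#' else ' ')
    n (PySem.List.pyRange 0 n 1) n.toNat 0
    ((PySem.List.pyRange 0 n 1).map (fun _ => ([] : List Char)))
    (by omega) (by omega) hansl (fun j _ => hansz j)
  apply List.ext_getElem
  · rw [List.length_map, hL]
    simp [PySem.List.length_pyRange_one]
  · intro t hta htb
    rw [List.length_map, hL] at hta
    rw [List.getElem_map, List.getElem_map]
    have h := hG t
    rw [if_neg (by omega)] at h
    rw [List.getD_eq_getElem _ _ (by omega)] at h
    rw [PySem.List.getElem_pyRange_one]
    rw [show (0 : Int) + (t : Int) = (t : Int) by ring]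
    rw [h]
    exact congrArg String.mk (pv_row_eq n arr1 arr2 h1 h2 t hta)
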